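-- pv_equiv track=rewrite | github.com/guwidoe/GroupMixer | tools/autoresearch/solver4-8x4x10/aggregate_metrics.py | parse_seed_label
-- ===== SOURCE A (Python) =====
-- def parse_seed_label(purpose_summary: str, index: int) -> str:
--     marker = ".seed_"
--     if marker in purpose_summary:
--         tail = purpose_summary.split(marker, 1)[1]
--         digits = []
--         for ch in tail:
--             if ch.isdigit():
--                 digits.append(ch)
--             else:
--                 break
--         if digits:
--             return f"seed_{''.join(digits)}"
--     return f"case_{index + 1}"
-- ===== SOURCE B (Python) =====
-- import re
--
-- def parse_seed_label(purpose_summary: str, index: int) -> str: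
--     m = re.search(r"\.seed_(\d*)", purpose_summary)
--     if m and m.group(1):
--         return f"seed_{m.group(1)}"
--     return f"case_{index + 1}"
-- ===== Notes on version B (the rewrite author's own statement) =====
-- stated objective: idiomatic
-- what changed: Replaces the split-on-marker plus explicit char-by-char break loop with a single regex search for the first '.seed_' followed by a (possibly empty) digit run.
import Mathlib
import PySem

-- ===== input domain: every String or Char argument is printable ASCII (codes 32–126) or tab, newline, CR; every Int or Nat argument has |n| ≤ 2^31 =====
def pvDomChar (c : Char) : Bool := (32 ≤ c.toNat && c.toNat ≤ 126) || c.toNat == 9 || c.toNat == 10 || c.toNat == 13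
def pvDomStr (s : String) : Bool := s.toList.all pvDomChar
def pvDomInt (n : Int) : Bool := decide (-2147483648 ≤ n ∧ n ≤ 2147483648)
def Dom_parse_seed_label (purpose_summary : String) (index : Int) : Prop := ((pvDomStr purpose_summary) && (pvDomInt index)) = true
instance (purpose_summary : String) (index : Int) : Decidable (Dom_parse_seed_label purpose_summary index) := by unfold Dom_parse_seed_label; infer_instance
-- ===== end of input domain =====

-- B replaces A's split-plus-break-loop with a single regex search (ported below as
-- first-occurrence search + maximal digit run, which is exactly the pattern's meaning);
-- objective: idiomatic. Equivalence proved on all inputs (no Pre_).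

-- ===== PORT A =====
-- the 'for ch in tail: append / break' loop, with the Python accumulator (appended order,
-- kept reversed here and reversed back at the join)
def pvDigitsLoopA (acc : List Char) : List Char → List Char
  | [] => acc
  | c :: rest => if PySem.Chars.isdigit c then pvDigitsLoopA (c :: acc) rest else acc

def parse_seed_label (purpose_summary : String) (index : Int) : String :=
  let marker := ".seed_"
  if PySem.Str.isIn marker purpose_summary then
    -- purpose_summary.split(marker, 1)[1]; the index 1 is in range because marker ∈ purpose_summary
    let tail := ((PySem.List.pyGet? ((PySem.Str.splitMax? purpose_summary marker 1).getD []) 1).getD "")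
    let digits := (pvDigitsLoopA [] tail.toList).reverse
    if digits ≠ [] then "seed_" ++ String.ofList digits
    else "case_" ++ PySem.Int.toStr (index + 1)
  else "case_" ++ PySem.Int.toStr (index + 1)

-- ===== PORT B =====
-- re.search(r"\.seed_(\d*)", s): since \d* also matches the empty run, the pattern matches at
-- the FIRST occurrence of ".seed_", and group(1) is the maximal ASCII digit run after it;
-- the port is exact for this fixed pattern on the ASCII domain.
def parse_seed_label_alt (purpose_summary : String) (index : Int) : String :=
  let i := PySem.Str.find purpose_summary ".seed_"
  if i = -1 then "case_" ++ PySem.Int.toStr (index + 1)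
  else
    let g := (purpose_summary.toList.drop (i.toNat + 6)).takeWhile PySem.Chars.isdigit
    if g.isEmpty then "case_" ++ PySem.Int.toStr (index + 1)
    else "seed_" ++ String.ofList g

-- ===== PRECONDITION & SPEC =====
def Spec_parse_seed_label (purpose_summary : String) (index : Int) (out : String) : Prop := out = parse_seed_label_alt purpose_summary index
instance (purpose_summary : String) (index : Int) (out : String) : Decidable (Spec_parse_seed_label purpose_summary index out) := by unfold Spec_parse_seed_label; infer_instance

-- ===== CLAIM (what is proved, stated in full; the proofs are below) =====
def Claim_equal_parse_seed_label : Prop := ∀ (purpose_summary : String) (index : Int), Dom_parse_seed_label purpose_summary index → Spec_parse_seed_label purpose_summary index (parse_seed_label purpose_summary index)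

-- ===== LEMMAS AND PROOFS =====

-- index (from the front) of the first position where sep is a prefix, if any
def pvFirstOcc (sep : List Char) : List Char → Option Nat
  | [] => none
  | c :: rest => if sep.isPrefixOf (c :: rest) then some 0 else (pvFirstOcc sep rest).map (· + 1)

theorem pvFind_go_eq (sep : List Char) (hsep : sep ≠ []) :
    ∀ (s : List Char) (k : Nat),
      PySem.Chars.find.go sep s k =
        (match pvFirstOcc sep s with
         | none => (-1 : Int)
         | some j => (k : Int) + j) := by
  intro s
  induction s with
  | nil =>
      intro k
      simp [PySem.Chars.find.go, pvFirstOcc, List.isEmpty_iff, hsep]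
  | cons c rest ih =>
      intro k
      rw [PySem.Chars.find.go]
      by_cases hp : sep.isPrefixOf (c :: rest)
      · simp [hp, pvFirstOcc]
      · simp only [hp, ih (k + 1), pvFirstOcc]
        cases pvFirstOcc sep rest with
        | none => simp
        | some j => simp; ring

theorem pvSplitGo_zero (sep : List Char) :
    ∀ (f : Nat) (l : List Char) (acc : List (List Char)),
      PySem.Chars.splitOnMax.go sep f 0 l [] acc = (l :: acc).reverse := by
  intro f l acc
  cases f with
  | zero => cases l <;> rw [PySem.Chars.splitOnMax.go] <;> simp
  | succ f => cases l <;> rw [PySem.Chars.splitOnMax.go] <;> simp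

theorem pvSplitGo_one (sep : List Char) :
    ∀ (s : List Char) (fuel : Nat) (cur : List Char) (acc : List (List Char)),
      s.length + 1 ≤ fuel →
      PySem.Chars.splitOnMax.go sep fuel 1 s cur acc =
        (match pvFirstOcc sep s with
         | none => ((cur.reverse ++ s) :: acc).reverse
         | some j => ((s.drop (j + sep.length)) :: (cur.reverse ++ s.take j) :: acc).reverse) := by
  intro s
  induction s with
  | nil =>
      intro fuel cur acc hf
      cases fuel with
      | zero => omega
      | succ f =>
          rw [PySem.Chars.splitOnMax.go]
          simp [pvFirstOcc]
          omega
  | cons c rest ih =>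
      intro fuel cur acc hf
      cases fuel with
      | zero => simp at hf
      | succ f =>
        rw [PySem.Chars.splitOnMax.go]
        by_cases hp : sep.isPrefixOf (c :: rest)
        · simp only [hp, if_true, pvFirstOcc, Nat.one_ne_zero, if_false]
          rw [pvSplitGo_zero]
          simp
        · simp only [hp, if_false, pvFirstOcc, Nat.one_ne_zero]
          rw [ih f (c :: cur) acc (by simpa using Nat.succ_le_succ_iff.mp hf)]
          cases pvFirstOcc sep rest with
          | none => simp
          | some j =>
              have h2 : j + 1 + sep.length = (j + sep.length) + 1 := by omega
              simp [h2]

-- the break-loop computes takeWhile isdigit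
theorem pvDigitsLoopA_eq :
    ∀ (l : List Char) (acc : List Char),
      (pvDigitsLoopA acc l).reverse = acc.reverse ++ l.takeWhile PySem.Chars.isdigit := by
  intro l
  induction l with
  | nil => intro acc; simp [pvDigitsLoopA]
  | cons c rest ih =>
      intro acc
      by_cases hd : PySem.Chars.isdigit c
      · simp [pvDigitsLoopA, hd, ih]
      · simp [pvDigitsLoopA, hd]

-- ===== VERDICT (by name: the statement is the Claim_ definition above) =====
theorem parse_seed_label_spec : Claim_equal_parse_seed_label := by
  intro s index _
  unfold Spec_parse_seed_label parse_seed_label parse_seed_label_alt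
  simp only []
  have hsep : (['.', 's', 'e', 'e', 'd', '_'] : List Char) ≠ [] := by decide
  have hL : (".seed_" : String).toList = ['.', 's', 'e', 'e', 'd', '_'] := rfl
  have hfg := pvFind_go_eq ['.', 's', 'e', 'e', 'd', '_'] hsep s.toList 0
  cases hocc : pvFirstOcc ['.', 's', 'e', 'e', 'd', '_'] s.toList with
  | none =>
      have hF : PySem.Str.find s ".seed_" = -1 := by
        rw [PySem.Str.find_eq, hL, PySem.Chars.find, hfg, hocc]
      have h1 : ¬ (PySem.Str.isIn ".seed_" s = true) := by
        rw [PySem.Str.isIn_eq, hL, PySem.Chars.isIn, PySem.Chars.find, hfg, hocc]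
        simp
      rw [if_neg h1, if_pos hF]
  | some j =>
      have hF : PySem.Str.find s ".seed_" = (j : Int) := by
        rw [PySem.Str.find_eq, hL, PySem.Chars.find, hfg, hocc]
        simp
      have h1 : PySem.Str.isIn ".seed_" s = true := by
        rw [PySem.Str.isIn_eq, hL, PySem.Chars.isIn, PySem.Chars.find, hfg, hocc]
        simp
      have hjne : PySem.Str.find s ".seed_" ≠ -1 := by rw [hF]; omega
      rw [if_pos h1, if_neg hjne, hF]
      have hgo := pvSplitGo_one ['.', 's', 'e', 'e', 'd', '_'] s.toList
        (s.toList.length + 1) [] [] (le_refl _)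
      rw [hocc] at hgo
      have hsplit : PySem.Str.splitMax? s ".seed_" 1 =
          some (List.map String.ofList [s.toList.take j, s.toList.drop (j + 6)]) := by
        rw [PySem.Str.splitMax?, PySem.Chars.splitMax?, hL, if_neg (by decide),
          PySem.Chars.splitOnMax, if_neg (by decide)]
        rw [show ((1 : Int)).toNat = 1 from rfl, hgo]
        simp
      have hget : ∀ (x y : String), PySem.List.pyGet? [x, y] 1 = some y := by
        intro x y; simp [PySem.List.pyGet?, PySem.List.pyIdx?]
      rw [hsplit, Option.getD_some]
      simp only [List.map_cons, List.map_nil]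
      rw [hget, Option.getD_some, String.toList_ofList, Int.toNat_natCast,
        pvDigitsLoopA_eq]
      simp only [List.reverse_nil, List.nil_append]
      by_cases hE : (List.takeWhile PySem.Chars.isdigit (List.drop (j + 6) s.toList)) = []
      · simp [hE]
      · simp [hE]
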